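-- pv_equiv track=rewrite | github.com/jamesbarboza/dops | scripts/named_entity_recognition.py | to_iob_form
-- ===== SOURCE A (Python) =====
-- def to_iob_form(gmb_form):
--     iob_form = []
--     for count,gmb_token in enumerate(gmb_form) :
--         word, pos_tag, ner_tag = gmb_token
--
--         if ner_tag != 'O':
--
--             if count == 0 :
--                 ner_tag = "B-" + ner_tag.split('-')[1]
--             elif gmb_form[count-1][2] == ner_tag :
--                 ner_tag = "I-" + ner_tag.split('-')[1]
--             else:
--                 ner_tag = "B-" + ner_tag.split('-')[1]
--
--         iob_form.append((word,pos_tag,ner_tag))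
--
--     return iob_form
-- ===== SOURCE B (Python) =====
-- def to_iob_form(gmb_form):
--     # One pass over maximal runs of identical ner_tags instead of per-token
--     # previous-element comparison.
--     out = []
--     i, n = 0, len(gmb_form)
--     while i < n:
--         tag = gmb_form[i][2]
--         j = i
--         while j < n and gmb_form[j][2] == tag:
--             j += 1
--         run = gmb_form[i:j]
--         if tag == 'O':
--             out.extend(run)
--         else:
--             suf = tag.split('-')[1]
--             w, p, _ = run[0]
--             out.append((w, p, 'B-' + suf))
--             for w, p, _ in run[1:]:
--                 out.append((w, p, 'I-' + suf))
--         i = j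
--     return out
-- ===== Notes on version B (the rewrite author's own statement) =====
-- stated objective: alternative
-- what changed: B groups the tokens into maximal runs of equal ner_tag and tags each run's head B- and its tail I- (suffix computed once per run), instead of A's per-token comparison with gmb_form[count-1][2].
import Mathlib
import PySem

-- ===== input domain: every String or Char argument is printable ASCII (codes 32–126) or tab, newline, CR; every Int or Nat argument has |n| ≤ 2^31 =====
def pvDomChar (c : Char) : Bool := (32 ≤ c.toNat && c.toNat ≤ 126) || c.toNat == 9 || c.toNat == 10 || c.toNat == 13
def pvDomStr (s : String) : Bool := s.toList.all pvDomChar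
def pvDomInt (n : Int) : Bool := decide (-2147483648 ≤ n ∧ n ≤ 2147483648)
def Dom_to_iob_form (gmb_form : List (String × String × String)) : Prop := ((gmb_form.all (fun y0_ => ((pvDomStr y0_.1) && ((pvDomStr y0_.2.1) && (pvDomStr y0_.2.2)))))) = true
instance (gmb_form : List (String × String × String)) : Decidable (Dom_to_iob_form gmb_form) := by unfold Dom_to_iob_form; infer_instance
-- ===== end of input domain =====

-- B re-tags maximal runs of equal ner_tag (head B-, rest I-) instead of A's per-token
-- lookback at gmb_form[count-1][2]; same cost, different decomposition.

-- ner_tag.split('-')[1]; the IndexError case (no '-' in a non-'O' tag) is excluded by Pre_,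
-- there getD supplies a dummy value.
def pvSplitSecond (tag : String) : String :=
  (PySem.List.pyGet? ((PySem.Str.split? tag "-").getD []) 1).getD ""

-- ===== PORT A =====
def to_iob_form (gmb_form : List (String × String × String)) : List (String × String × String) :=
  (PySem.List.enumerate gmb_form).foldl (fun iob_form ct =>
    let count := ct.1
    let word := ct.2.1
    let pos_tag := ct.2.2.1
    let ner_tag := ct.2.2.2
    let ner_tag' :=
      if ner_tag ≠ "O" then
        if count = 0 then "B-" ++ pvSplitSecond ner_tag
        else if (PySem.List.pyGet? gmb_form (count - 1)).map (fun p => p.2.2) = some ner_tag then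
          "I-" ++ pvSplitSecond ner_tag
        else "B-" ++ pvSplitSecond ner_tag
      else ner_tag
    iob_form ++ [(word, pos_tag, ner_tag')]) []

-- ===== PORT B =====
-- the inner `while j < n and gmb_form[j][2] == tag` scan: splits off the maximal run of tag
def pvTakeRun (tag : String) : List (String × String × String) →
    List (String × String × String) × List (String × String × String)
  | [] => ([], [])
  | x :: xs =>
    if x.2.2 = tag then
      let p := pvTakeRun tag xs
      (x :: p.1, p.2)
    else ([], x :: xs)

lemma pvTakeRun_rest_length (tag : String) :
    ∀ l : List (String × String × String), (pvTakeRun tag l).2.length ≤ l.length := by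
  intro l
  induction l with
  | nil => simp [pvTakeRun]
  | cons x xs ih =>
    simp only [pvTakeRun]
    split
    · simp; omega
    · simp

def to_iob_form_alt : List (String × String × String) → List (String × String × String)
  | [] => []
  | x :: xs =>
    let tag := x.2.2
    let p := pvTakeRun tag xs
    let run :=
      if tag = "O" then x :: p.1
      else
        let suf := pvSplitSecond tag
        (x.1, x.2.1, "B-" ++ suf) :: p.1.map (fun y => (y.1, y.2.1, "I-" ++ suf))
    run ++ to_iob_form_alt p.2
termination_by l => l.length
decreasing_by
  have := pvTakeRun_rest_length x.2.2 xs
  simp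
  omega

-- ===== PRECONDITION & SPEC =====
-- Pre_ excludes exactly the inputs where Python A raises IndexError: a token whose
-- ner_tag is not 'O' yet contains no '-', so ner_tag.split('-')[1] fails.
def Pre_to_iob_form (gmb_form : List (String × String × String)) : Prop :=
  ∀ t ∈ gmb_form, t.2.2 ≠ "O" → 2 ≤ ((PySem.Str.split? t.2.2 "-").getD []).length
instance (gmb_form : List (String × String × String)) : Decidable (Pre_to_iob_form gmb_form) := by
  unfold Pre_to_iob_form; infer_instance

def pvWitness_to_iob_form : (List (String × String × String)) :=
  [("John", "NNP", "B-per"), ("runs", "VBZ", "O"), ("Paris", "NNP", "I-geo")]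

def Spec_to_iob_form (gmb_form : List (String × String × String)) (out : List (String × String × String)) : Prop := out = to_iob_form_alt gmb_form
instance (gmb_form : List (String × String × String)) (out : List (String × String × String)) : Decidable (Spec_to_iob_form gmb_form out) := by unfold Spec_to_iob_form; infer_instance

-- ===== CLAIM (what is proved, stated in full; the proofs are below) =====
def Claim_equal_to_iob_form : Prop := ∀ (gmb_form : List (String × String × String)), Dom_to_iob_form gmb_form → Pre_to_iob_form gmb_form → Spec_to_iob_form gmb_form (to_iob_form gmb_form)

-- ===== LEMMAS AND PROOFS =====

-- Reference one-pass recursion threading the previous original ner_tag; both ports are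
-- proved equal to it (for A with prev = none at the start).
def pvSpecGo : Option String → List (String × String × String) → List (String × String × String)
  | _, [] => []
  | prev, x :: xs =>
    let ner := x.2.2
    let ner' :=
      if ner ≠ "O" then
        (if prev = some ner then "I-" else "B-") ++ pvSplitSecond ner
      else ner
    (x.1, x.2.1, ner') :: pvSpecGo (some ner) xs

-- the per-element function of A's fold
def pvFA (g : List (String × String × String)) (ct : Int × (String × String × String)) :
    String × String × String :=
  (ct.2.1, ct.2.2.1,
    if ct.2.2.2 ≠ "O" then
      if ct.1 = 0 then "B-" ++ pvSplitSecond ct.2.2.2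
      else if (PySem.List.pyGet? g (ct.1 - 1)).map (fun p => p.2.2) = some ct.2.2.2 then
        "I-" ++ pvSplitSecond ct.2.2.2
      else "B-" ++ pvSplitSecond ct.2.2.2
    else ct.2.2.2)

lemma pvA_enum (g : List (String × String × String)) :
    to_iob_form g = (PySem.List.enumerate g).map (pvFA g) := by
  show List.foldl (fun iob_form ct => iob_form ++ [pvFA g ct]) [] (PySem.List.enumerate g) = _
  exact PySem.List.foldl_append_singleton_eq_map (pvFA g) _ []

lemma pvA_spec_aux (g : List (String × String × String)) :
    ∀ (l pre : List (String × String × String)), g = pre ++ l →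
    (PySem.List.enumerate l (pre.length : Int)).map (pvFA g) =
      pvSpecGo (pre.getLast?.map (fun p => p.2.2)) l := by
  intro l
  induction l with
  | nil => intro pre h; simp [PySem.List.enumerate_nil, pvSpecGo]
  | cons x xs ih =>
    intro pre h
    rw [PySem.List.enumerate_cons, List.map_cons]
    have hrec : (PySem.List.enumerate xs ((pre.length : Int) + 1)).map (pvFA g) =
        pvSpecGo (some x.2.2) xs := by
      have h' : g = (pre ++ [x]) ++ xs := by simp [h]
      have := ih (pre ++ [x]) h'
      simpa [List.getLast?_concat] using this
    simp only [pvSpecGo]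
    rw [hrec]
    congr 1
    by_cases hO : x.2.2 = "O"
    · simp [pvFA, hO]
    · simp only [pvFA, ne_eq, hO, not_false_iff, if_pos]
      rcases List.eq_nil_or_concat pre with rfl | ⟨pre', y, rfl⟩
      · simp
      · simp only [List.concat_eq_append] at h ⊢
        have hne : (((pre' ++ [y]).length : Int)) ≠ 0 := by
          simp only [List.length_append, List.length_cons, List.length_nil]; push_cast; omega
        rw [if_neg hne]
        have hg : g = pre' ++ y :: (x :: xs) := by simp [h]
        have hidx : (((pre' ++ [y]).length : Int)) - 1 = (pre'.length : Int) := by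
          simp only [List.length_append, List.length_cons, List.length_nil]; push_cast; omega
        have hget : PySem.List.pyGet? g ((((pre' ++ [y]).length : Int)) - 1) = some y := by
          rw [hidx, hg]
          exact PySem.List.pyGet?_append_length pre' (x :: xs) y
        rw [hget, List.getLast?_concat]
        simp only [Option.map_some]
        by_cases hI : y.2.2 = x.2.2
        · simp [hI]
        · have : ¬ (some y.2.2 = some x.2.2) := by simp [hI]
          rw [if_neg this, if_neg this]

lemma pvA_eq_spec (g : List (String × String × String)) :
    to_iob_form g = pvSpecGo none g := by
  rw [pvA_enum]
  have := pvA_spec_aux g g [] (by simp)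
  simpa using this

-- pvTakeRun structure facts
lemma pvTakeRun_append (tag : String) :
    ∀ l : List (String × String × String), (pvTakeRun tag l).1 ++ (pvTakeRun tag l).2 = l := by
  intro l
  induction l with
  | nil => simp [pvTakeRun]
  | cons x xs ih =>
    simp only [pvTakeRun]
    split
    · simpa using ih
    · simp

lemma pvTakeRun_run_tag (tag : String) :
    ∀ l : List (String × String × String), ∀ y ∈ (pvTakeRun tag l).1, y.2.2 = tag := by
  intro l
  induction l with
  | nil => simp [pvTakeRun]
  | cons x xs ih =>
    simp only [pvTakeRun]
    split
    · rename_i hx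
      intro y hy
      simp at hy
      rcases hy with rfl | hy
      · exact hx
      · exact ih y hy
    · simp

lemma pvTakeRun_rest_head (tag : String) :
    ∀ l : List (String × String × String), ∀ h t, (pvTakeRun tag l).2 = h :: t → h.2.2 ≠ tag := by
  intro l
  induction l with
  | nil => simp [pvTakeRun]
  | cons x xs ih =>
    simp only [pvTakeRun]
    split
    · exact ih
    · rename_i hx
      intro h t he
      simp at he
      rw [← he.1]
      exact hx

-- a run of tokens all tagged `tag` ≠ 'O', entered with prev = some tag, maps to I- tokens
lemma pvSpec_run_I (tag : String) (hO : tag ≠ "O") :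
    ∀ (r rest : List (String × String × String)), (∀ y ∈ r, y.2.2 = tag) →
    pvSpecGo (some tag) (r ++ rest) =
      r.map (fun y => (y.1, y.2.1, "I-" ++ pvSplitSecond tag)) ++ pvSpecGo (some tag) rest := by
  intro r
  induction r with
  | nil => simp
  | cons y ys ih =>
    intro rest hall
    have hy : y.2.2 = tag := hall y (by simp)
    simp only [List.cons_append, pvSpecGo, List.map_cons]
    rw [hy]
    simp [hO, ih rest (fun z hz => hall z (by simp [hz]))]

-- a run of 'O' tokens passes through unchanged, leaving prev = some "O"
lemma pvSpec_run_O :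
    ∀ (r rest : List (String × String × String)), (∀ y ∈ r, y.2.2 = "O") →
    pvSpecGo (some "O") (r ++ rest) = r ++ pvSpecGo (some "O") rest := by
  intro r
  induction r with
  | nil => simp
  | cons y ys ih =>
    intro rest hall
    have hy : y.2.2 = "O" := hall y (by simp)
    simp only [List.cons_append, pvSpecGo]
    rw [hy]
    simp only [ne_eq, not_true_eq_false, if_false]
    have hx : (y.1, y.2.1, "O") = y := by rw [← hy]
    rw [hx]
    congr 1
    exact ih rest (fun z hz => hall z (by simp [hz]))

lemma pvB_eq_spec_aux :
    ∀ (n : Nat) (l : List (String × String × String)) (prev : Option String),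
    l.length ≤ n → (∀ h t, l = h :: t → prev ≠ some h.2.2) →
    to_iob_form_alt l = pvSpecGo prev l := by
  intro n
  induction n with
  | zero =>
    intro l prev hlen _
    have hnil : l = [] := by
      cases l with
      | nil => rfl
      | cons a b => simp at hlen
    subst hnil
    simp [to_iob_form_alt, pvSpecGo]
  | succ m ih =>
    intro l prev hlen hprev
    cases l with
    | nil => simp [to_iob_form_alt, pvSpecGo]
    | cons x xs =>
      have hps := pvTakeRun_append x.2.2 xs
      have hrun := pvTakeRun_run_tag x.2.2 xs
      have hresthead := pvTakeRun_rest_head x.2.2 xs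
      have hrestlen : (pvTakeRun x.2.2 xs).2.length ≤ m := by
        have h1 := pvTakeRun_rest_length x.2.2 xs
        simp at hlen
        omega
      have hxs : xs = (pvTakeRun x.2.2 xs).1 ++ (pvTakeRun x.2.2 xs).2 := hps.symm
      have hprevx : prev ≠ some x.2.2 := hprev x xs rfl
      have hrec : to_iob_form_alt (pvTakeRun x.2.2 xs).2 =
          pvSpecGo (some x.2.2) (pvTakeRun x.2.2 xs).2 := by
        apply ih _ _ hrestlen
        intro h t he
        have hne := hresthead h t he
        simp only [ne_eq, Option.some_inj]
        intro hc
        exact hne hc.symm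
      rw [show to_iob_form_alt (x :: xs) =
          (if x.2.2 = "O" then x :: (pvTakeRun x.2.2 xs).1
           else
             (x.1, x.2.1, "B-" ++ pvSplitSecond x.2.2) ::
               (pvTakeRun x.2.2 xs).1.map
                 (fun y => (y.1, y.2.1, "I-" ++ pvSplitSecond x.2.2))) ++
            to_iob_form_alt (pvTakeRun x.2.2 xs).2 from by
        simp only [to_iob_form_alt]]
      by_cases hO : x.2.2 = "O"
      · rw [if_pos hO]
        rw [hO] at hrun hrec hxs ⊢
        have hhead : pvSpecGo prev (x :: xs) = x :: pvSpecGo (some "O") xs := by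
          simp only [pvSpecGo, hO, ne_eq, not_true_eq_false, if_false]
          congr 1
          rw [← hO]
        rw [hhead]
        conv_rhs => rw [hxs]
        rw [pvSpec_run_O _ _ hrun, hrec]
        simp
      · rw [if_neg hO]
        have hhead : pvSpecGo prev (x :: xs) =
            (x.1, x.2.1, "B-" ++ pvSplitSecond x.2.2) :: pvSpecGo (some x.2.2) xs := by
          simp only [pvSpecGo, ne_eq, hO, not_false_iff, if_pos]
          rw [if_neg hprevx]
        rw [hhead]
        conv_rhs => rw [hxs]
        rw [pvSpec_run_I x.2.2 hO _ _ hrun, hrec]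
        simp

lemma pvB_eq_spec (g : List (String × String × String)) :
    to_iob_form_alt g = pvSpecGo none g :=
  pvB_eq_spec_aux g.length g none le_rfl (by intro h t _; simp)

-- ===== VERDICT (by name: the statement is the Claim_ definition above) =====
theorem to_iob_form_spec : Claim_equal_to_iob_form := by
  intro g _ _
  unfold Spec_to_iob_form
  rw [pvA_eq_spec, pvB_eq_spec]
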